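-- pv_equiv track=rewrite | github.com/yongunt/problems | reverse_the_string_with_a_catch/main.py | special_reverse_string
-- ===== SOURCE A (Python) =====
-- def get_space_indexes(txt:str) -> list[int]:
--     holder:list[int] = []
--     for i in range(len(txt)):
--         if txt[i] == ' ': holder.append(i)
--     return holder
--
-- def get_uppercase_indexes(txt:str) -> list[int]:
--     holder:list[int] = []
--     for i in range(len(txt)):
--         if txt[i].upper() == txt[i] and txt[i] != ' ': holder.append(i)
--     return holder
--
-- def special_reverse_string(txt:str) -> str:
--     lowercase_reversed_txt_items:str = [i.lower() for i in txt if i != ' '][::-1]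
--     index_of_spaces:list[int] = get_space_indexes(txt)
--     index_of_uppercases:list[int] = get_uppercase_indexes(txt)
--     ans:str = ""
--     counter:int = 0
--
--     while lowercase_reversed_txt_items != []:
--         if counter in index_of_spaces:
--             ans += ' '
--         elif counter in index_of_uppercases:
--             ans += lowercase_reversed_txt_items[0].upper()
--             lowercase_reversed_txt_items.pop(0)
--         else:
--             ans += lowercase_reversed_txt_items[0]
--             lowercase_reversed_txt_items.pop(0)
--
--         counter += 1
--
--     return ans
-- ===== SOURCE B (Python) =====
-- def special_reverse_string(txt: str) -> str:
--     rev = [c.lower() for c in txt if c != ' '][::-1]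
--     total = len(rev)
--     out = []
--     idx = 0
--     for c in txt:
--         if idx == total:
--             break
--         if c == ' ':
--             out.append(' ')
--         elif c.upper() == c:
--             out.append(rev[idx].upper())
--             idx += 1
--         else:
--             out.append(rev[idx])
--             idx += 1
--     return ''.join(out)
-- ===== Notes on version B (the rewrite author's own statement) =====
-- stated objective: faster
-- what changed: Replaces the two index-table passes and the per-iteration list membership tests and pop(0) with a single scan over txt carrying an index into the precomputed reversed lowered list.
import Mathlib
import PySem

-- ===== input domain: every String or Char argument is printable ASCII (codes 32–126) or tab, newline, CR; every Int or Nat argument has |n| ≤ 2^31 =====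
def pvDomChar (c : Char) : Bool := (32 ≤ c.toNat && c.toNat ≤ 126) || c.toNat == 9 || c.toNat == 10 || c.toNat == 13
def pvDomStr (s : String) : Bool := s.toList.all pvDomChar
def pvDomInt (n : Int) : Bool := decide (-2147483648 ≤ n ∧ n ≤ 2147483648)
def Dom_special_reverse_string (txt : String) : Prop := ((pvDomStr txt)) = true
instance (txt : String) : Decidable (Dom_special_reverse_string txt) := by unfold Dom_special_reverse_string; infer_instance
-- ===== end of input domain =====

-- B replaces A's two index-table passes, per-step list membership tests and pop(0)
-- with a single scan over txt carrying an index into the precomputed reversed list (faster).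

-- ===== PORT A =====

-- for i in range(len(txt)): if txt[i] == ' ': holder.append(i)
def pvGetSpaceIndexes (txt : String) : List Int :=
  (PySem.List.pyRange 0 (txt.toList.length : Int) 1).foldl
    (fun holder i => if PySem.List.pyGetD txt.toList i ' ' = ' ' then holder ++ [i] else holder) []

-- for i in range(len(txt)): if txt[i].upper() == txt[i] and txt[i] != ' ': holder.append(i)
def pvGetUppercaseIndexes (txt : String) : List Int :=
  (PySem.List.pyRange 0 (txt.toList.length : Int) 1).foldl
    (fun holder i =>
      if PySem.Chars.upperChar (PySem.List.pyGetD txt.toList i ' ') = PySem.List.pyGetD txt.toList i ' '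
         ∧ PySem.List.pyGetD txt.toList i ' ' ≠ ' '
      then holder ++ [i] else holder) []

-- termination helpers for A's while loop (cited by decreasing_by)
theorem pv_filter_ge_le (l : List Int) (c : Int) :
    (l.filter (fun i => decide (c < i))).length ≤ (l.filter (fun i => decide (c ≤ i))).length := by
  induction l with
  | nil => simp
  | cons x xs ih =>
    by_cases h1 : c < x <;> by_cases h2 : c ≤ x <;>
      simp [h1, h2] <;> omega

theorem pv_filter_ge_lt (l : List Int) (c : Int) (h : c ∈ l) :
    (l.filter (fun i => decide (c < i))).length < (l.filter (fun i => decide (c ≤ i))).length := by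
  induction l with
  | nil => simp at h
  | cons x xs ih =>
    rcases List.mem_cons.mp h with rfl | hx
    · have := pv_filter_ge_le xs c
      simp
      omega
    · have := ih hx
      by_cases h1 : c < x <;> by_cases h2 : c ≤ x <;>
        simp [h1, h2] <;> omega

-- while lowercase_reversed_txt_items != []: …  (ans built as a char list, joined at the end)
def pvLoopA (spaces uppers : List Int) (rev : List Char) (counter : Int) (ans : List Char) : List Char :=
  match rev with
  | [] => ans
  | r0 :: rrest =>
    if counter ∈ spaces then
      pvLoopA spaces uppers (r0 :: rrest) (counter + 1) (ans ++ [' '])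
    else if counter ∈ uppers then
      pvLoopA spaces uppers rrest (counter + 1) (ans ++ [PySem.Chars.upperChar r0])
    else
      pvLoopA spaces uppers rrest (counter + 1) (ans ++ [r0])
  termination_by rev.length + (spaces.filter (fun i => decide (counter ≤ i))).length
  decreasing_by
  · have := pv_filter_ge_lt spaces counter (by assumption)
    simp; omega
  · have := pv_filter_ge_le spaces counter
    simp; omega
  · have := pv_filter_ge_le spaces counter
    simp; omega

def special_reverse_string (txt : String) : String :=
  -- [i.lower() for i in txt if i != ' '][::-1] ; the slice [::-1] is List.reverse
  let rev := ((txt.toList.filter (fun c => c ≠ ' ')).map PySem.Chars.lowerChar).reverse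
  String.ofList (pvLoopA (pvGetSpaceIndexes txt) (pvGetUppercaseIndexes txt) rev 0 [])

-- ===== PORT B =====

-- for c in txt: if idx == total: break; … (out built as a char list, ''.join at the end)
def pvLoopB (rev : List Char) (cs : List Char) (idx : Nat) (out : List Char) : List Char :=
  match cs with
  | [] => out
  | c :: rest =>
    if idx = rev.length then out
    else if c = ' ' then pvLoopB rev rest idx (out ++ [' '])
    else if PySem.Chars.upperChar c = c then
      pvLoopB rev rest (idx + 1) (out ++ [PySem.Chars.upperChar (rev.getD idx ' ')])
    else
      pvLoopB rev rest (idx + 1) (out ++ [rev.getD idx ' '])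

def special_reverse_string_alt (txt : String) : String :=
  let rev := ((txt.toList.filter (fun c => c ≠ ' ')).map PySem.Chars.lowerChar).reverse
  String.ofList (pvLoopB rev txt.toList 0 [])

-- ===== PRECONDITION & SPEC =====
def Spec_special_reverse_string (txt : String) (out : String) : Prop := out = special_reverse_string_alt txt
instance (txt : String) (out : String) : Decidable (Spec_special_reverse_string txt out) := by unfold Spec_special_reverse_string; infer_instance

-- ===== CLAIM (what is proved, stated in full; the proofs are below) =====
def Claim_equal_special_reverse_string : Prop := ∀ (txt : String), Dom_special_reverse_string txt → Spec_special_reverse_string txt (special_reverse_string txt)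

-- ===== LEMMAS AND PROOFS =====

theorem pv_mem_spaces (txt : String) (k : Nat) (hk : k < txt.toList.length) :
    ((k : Int) ∈ pvGetSpaceIndexes txt) ↔ txt.toList[k] = ' ' := by
  unfold pvGetSpaceIndexes
  rw [PySem.List.foldl_append_ite_eq_filter]
  have hk' : k < txt.length := by simpa using hk
  simp [hk', List.mem_filter, PySem.List.mem_pyRange_one, PySem.List.pyGetD_natCast,
        List.getD_eq_getElem?_getD]

theorem pv_mem_uppers (txt : String) (k : Nat) (hk : k < txt.toList.length) :
    ((k : Int) ∈ pvGetUppercaseIndexes txt) ↔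
      (PySem.Chars.upperChar txt.toList[k] = txt.toList[k] ∧ txt.toList[k] ≠ ' ') := by
  unfold pvGetUppercaseIndexes
  rw [PySem.List.foldl_append_ite_eq_filter]
  have hk' : k < txt.length := by simpa using hk
  simp [hk', List.mem_filter, PySem.List.mem_pyRange_one, PySem.List.pyGetD_natCast,
        List.getD_eq_getElem?_getD]

theorem pv_main (txt : String) (R : List Char) :
    ∀ (cs : List Char) (k idx : Nat) (ans : List Char),
      txt.toList.drop k = cs →
      idx ≤ R.length →
      R.length - idx = (cs.filter (fun c => c ≠ ' ')).length →
      pvLoopA (pvGetSpaceIndexes txt) (pvGetUppercaseIndexes txt) (R.drop idx) (k : Int) ans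
        = pvLoopB R cs idx ans := by
  intro cs
  induction cs with
  | nil =>
    intro k idx ans _ hle hlen
    simp at hlen
    have : idx = R.length := by omega
    subst this
    rw [List.drop_length, pvLoopA, pvLoopB]
  | cons c rest ih =>
    intro k idx ans hdrop hle hlen
    have hk : k < txt.toList.length := by
      by_contra h
      rw [List.drop_eq_nil_of_le (by omega)] at hdrop
      simp at hdrop
    have hck : txt.toList[k] = c := by
      rw [List.drop_eq_getElem_cons hk] at hdrop
      exact (List.cons.injEq _ _ _ _ ▸ hdrop).1
    have hrest : txt.toList.drop (k + 1) = rest := by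
      rw [List.drop_eq_getElem_cons hk] at hdrop
      exact (List.cons.injEq _ _ _ _ ▸ hdrop).2
    by_cases hidx : idx = R.length
    · -- B breaks; A's remaining list is empty
      subst hidx
      rw [List.drop_length, pvLoopA, pvLoopB]
      simp
    · have hlt : idx < R.length := by omega
      have hdropR : R.drop idx = R[idx] :: R.drop (idx + 1) := List.drop_eq_getElem_cons hlt
      have hgetD : R.getD idx ' ' = R[idx] := by
        rw [List.getD_eq_getElem?_getD, List.getElem?_eq_getElem hlt]; rfl
      have hcast : (k : Int) + 1 = ((k + 1 : Nat) : Int) := by push_cast; ring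
      rw [hdropR, pvLoopA, pvLoopB]
      by_cases hsp : c = ' '
      · -- space: neither side consumes rev
        have hmem : (k : Int) ∈ pvGetSpaceIndexes txt := (pv_mem_spaces txt k hk).mpr (hck ▸ hsp)
        rw [if_pos hmem, if_neg hidx, if_pos hsp, hcast, ← hdropR,
            ih (k + 1) idx (ans ++ [' ']) hrest hle (by rwa [List.filter_cons_of_neg (by simp [hsp])] at hlen)]
      · have hnsp : ¬ (k : Int) ∈ pvGetSpaceIndexes txt := fun h =>
          hsp (hck ▸ (pv_mem_spaces txt k hk).mp h)
        have hlen' : R.length - (idx + 1) = (rest.filter (fun c => c ≠ ' ')).length := by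
          rw [List.filter_cons_of_pos (by simp [hsp]), List.length_cons] at hlen
          omega
        have hstep := ih (k + 1) (idx + 1) (ans ++ [PySem.Chars.upperChar R[idx]]) hrest (by omega) hlen'
        have hstep' := ih (k + 1) (idx + 1) (ans ++ [R[idx]]) hrest (by omega) hlen'
        rw [if_neg hnsp, if_neg hidx, if_neg hsp]
        by_cases hup : PySem.Chars.upperChar c = c
        · have hmem : (k : Int) ∈ pvGetUppercaseIndexes txt :=
            (pv_mem_uppers txt k hk).mpr (by rw [hck]; exact ⟨hup, hsp⟩)
          rw [if_pos hmem, if_pos hup, hgetD, hcast, hstep]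
        · have hnmem : ¬ (k : Int) ∈ pvGetUppercaseIndexes txt := fun h =>
            hup (hck ▸ ((pv_mem_uppers txt k hk).mp h).1)
          rw [if_neg hnmem, if_neg hup, hgetD, hcast, hstep']

-- ===== VERDICT (by name: the statement is the Claim_ definition above) =====
theorem special_reverse_string_spec : Claim_equal_special_reverse_string := by
  intro txt _
  unfold Spec_special_reverse_string special_reverse_string special_reverse_string_alt
  have h := pv_main txt (((txt.toList.filter (fun c => c ≠ ' ')).map PySem.Chars.lowerChar).reverse) txt.toList 0 0 [] (by simp) (by simp) (by simp)
  simpa using congrArg String.ofList h
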